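-- pv_equiv track=rewrite | github.com/majaabuhasna/prg-basics | 04-Functions/7-15.py | f
-- ===== SOURCE A (Python) =====
-- def f(detector):
--     i = 0
--     for char in str(detector):
--         if char == '+':
--             i += 1
--             if i >= 3:
--                 return True
--         elif char == '-':
--             i -= 1
--     return False
-- ===== SOURCE B (Python) =====
-- def f(detector):
--     # Divide and conquer: scan(s) returns (total, maxpref) where total is the
--     # sum of +1/-1 deltas over s and maxpref is the maximum prefix sum
--     # (the empty prefix counts, so maxpref >= 0). The counter in the task
--     # reaches 3 exactly when some prefix sum is >= 3.
--     def scan(s):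
--         if len(s) <= 1:
--             d = 1 if s == '+' else (-1 if s == '-' else 0)
--             return (d, max(0, d))
--         mid = len(s) // 2
--         t1, m1 = scan(s[:mid])
--         t2, m2 = scan(s[mid:])
--         return (t1 + t2, max(m1, t1 + m2))
--     return scan(str(detector))[1] >= 3
-- ===== Notes on version B (the rewrite author's own statement) =====
-- stated objective: alternative
-- what changed: B replaces A's left-to-right counter with early return by a divide-and-conquer recursion: each half of the string is reduced to a pair (total delta, max prefix sum) combined as (t1+t2, max(m1, t1+m2)), and the answer is whether the whole string's max prefix sum is >= 3.
import Mathlib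
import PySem

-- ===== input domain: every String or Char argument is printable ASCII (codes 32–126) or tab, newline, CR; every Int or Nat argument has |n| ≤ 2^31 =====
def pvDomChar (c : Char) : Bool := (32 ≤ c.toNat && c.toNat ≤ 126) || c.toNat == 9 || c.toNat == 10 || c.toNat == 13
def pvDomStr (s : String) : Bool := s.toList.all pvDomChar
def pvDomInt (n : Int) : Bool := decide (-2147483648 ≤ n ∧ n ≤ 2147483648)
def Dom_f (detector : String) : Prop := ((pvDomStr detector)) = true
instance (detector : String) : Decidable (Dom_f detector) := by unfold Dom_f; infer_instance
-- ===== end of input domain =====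

-- B is a divide-and-conquer recursion computing (total delta, max prefix sum) per half,
-- instead of A's left-to-right counter with an early return (objective: alternative).

-- ===== PORT A =====
-- the for-loop with the counter i and the two early/normal exits
def fLoop : List Char → Int → Bool
  | [], _ => false
  | c :: rest, i =>
    if c = '+' then
      let i := i + 1
      if 3 ≤ i then true else fLoop rest i
    else if c = '-' then fLoop rest (i - 1)
    else fLoop rest i

def f (detector : String) : Bool := fLoop detector.toList 0

-- ===== PORT B =====
-- scan(s): (total delta, max prefix sum) by splitting at len//2
def scanB (l : List Char) : Int × Int :=
  if _h : l.length ≤ 1 then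
    let d : Int := if l = ['+'] then 1 else if l = ['-'] then -1 else 0
    (d, max 0 d)
  else
    let mid := l.length / 2
    let p1 := scanB (l.take mid)
    let p2 := scanB (l.drop mid)
    (p1.1 + p2.1, max p1.2 (p1.1 + p2.2))
termination_by l.length
decreasing_by
  · simp only [List.length_take]; omega
  · simp only [List.length_drop]; omega

def f_alt (detector : String) : Bool := decide (3 ≤ (scanB detector.toList).2)

-- ===== PRECONDITION & SPEC =====
def Spec_f (detector : String) (out : Bool) : Prop := out = f_alt detector
instance (detector : String) (out : Bool) : Decidable (Spec_f detector out) := by unfold Spec_f; infer_instance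

-- ===== CLAIM (what is proved, stated in full; the proofs are below) =====
def Claim_equal_f : Prop := ∀ (detector : String), Dom_f detector → Spec_f detector (f detector)

-- ===== LEMMAS AND PROOFS =====

def fDelta (c : Char) : Int := if c = '+' then 1 else if c = '-' then -1 else 0

-- total of deltas
def T : List Char → Int
  | [] => 0
  | c :: r => fDelta c + T r

-- max prefix sum (empty prefix included, so 0 ≤ M l)
def M : List Char → Int
  | [] => 0
  | c :: r => max 0 (fDelta c + M r)

theorem M_nonneg (l : List Char) : 0 ≤ M l := by
  cases l with
  | nil => simp [M]
  | cons c r => simp [M]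

theorem T_append (a b : List Char) : T (a ++ b) = T a + T b := by
  induction a with
  | nil => simp [T]
  | cons c r ih => simp [T, ih]; ring

theorem M_append (a b : List Char) : M (a ++ b) = max (M a) (T a + M b) := by
  induction a with
  | nil =>
      have := M_nonneg b
      simp [M, T]; omega
  | cons c r ih =>
      simp only [List.cons_append, M, T, ih]
      omega

theorem scanB_eq (l : List Char) : scanB l = (T l, M l) := by
  induction h : l.length using Nat.strong_induction_on generalizing l with
  | _ n ih =>
  subst h
  rw [scanB.eq_def]
  split_ifs with hle hp hm
  · subst hp; simp [T, M, fDelta]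
  · subst hm; simp [T, M, fDelta]
  · rcases l with _ | ⟨c, _ | ⟨c2, r⟩⟩
    · simp [T, M]
    · have h1 : ¬c = '+' := fun h => hp (by rw [h])
      have h2 : ¬c = '-' := fun h => hm (by rw [h])
      simp [T, M, fDelta, h1, h2]
    · simp at hle
  · dsimp only
    rw [ih _ (by simp only [List.length_take]; omega) _ rfl,
        ih _ (by simp only [List.length_drop]; omega) _ rfl]
    conv_rhs => rw [← List.take_append_drop (l.length / 2) l]
    rw [T_append, M_append]

theorem fLoop_eq (l : List Char) : ∀ i : Int, i ≤ 2 →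
    fLoop l i = decide (3 ≤ i + M l) := by
  induction l with
  | nil => intro i hi; simp [fLoop, M]; omega
  | cons c rest ih =>
      intro i hi
      by_cases hp : c = '+'
      · subst hp
        have hd : fDelta '+' = 1 := by decide
        have hr := M_nonneg rest
        simp only [fLoop, M, hd, if_true]
        by_cases h3 : 3 ≤ i + 1
        · rw [if_pos h3]
          have : 3 ≤ i + max 0 (1 + M rest) := by omega
          simp [this]
        · rw [if_neg h3, ih (i + 1) (by omega)]
          simp only [decide_eq_decide]; omega
      · by_cases hm : c = '-'
        · subst hm
          have hd : fDelta '-' = -1 := by decide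
          have hr := M_nonneg rest
          simp only [fLoop, M, hd, if_neg (by decide : ¬('-' : Char) = '+'), if_true]
          rw [ih (i - 1) (by omega)]
          simp only [decide_eq_decide]; omega
        · have hd : fDelta c = 0 := by simp [fDelta, hp, hm]
          simp only [fLoop, M, hd, if_neg hp, if_neg hm, zero_add]
          rw [ih i hi]
          have hr := M_nonneg rest
          simp only [decide_eq_decide]; omega

-- ===== VERDICT (by name: the statement is the Claim_ definition above) =====
theorem f_spec : Claim_equal_f := by
  intro detector _
  show fLoop detector.toList 0 = f_alt detector
  rw [f_alt, scanB_eq, fLoop_eq detector.toList 0 (by omega)]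
  simp
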